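-- pv_equiv track=rewrite | github.com/hth810/pythonlc | 周赛/ai/非递减数组的最大长度.py | maximumPossibleSize
-- ===== SOURCE A (Python) =====
-- from typing import List
--
-- def maximumPossibleSize(nums: List[int]) -> int:
--     stack=[]
--     for i in reversed(nums):
--         cur=i
--         while stack and cur>stack[-1]:
--             p=stack.pop()
--             cur=max(cur,p)
--         stack.append(cur)
--     return len(stack)
-- ===== SOURCE B (Python) =====
-- from typing import List
--
-- def maximumPossibleSize(nums: List[int]) -> int:
--     count = 0
--     best = None
--     for v in nums:
--         if best is None or v >= best:
--             count += 1
--             best = v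
--     return count
-- ===== Notes on version B (the rewrite author's own statement) =====
-- stated objective: simpler
-- what changed: Replaces the reverse-order monotonic-stack merge simulation with a single forward O(1)-space pass that counts left-to-right weak prefix maxima (running max + counter).
import Mathlib
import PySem

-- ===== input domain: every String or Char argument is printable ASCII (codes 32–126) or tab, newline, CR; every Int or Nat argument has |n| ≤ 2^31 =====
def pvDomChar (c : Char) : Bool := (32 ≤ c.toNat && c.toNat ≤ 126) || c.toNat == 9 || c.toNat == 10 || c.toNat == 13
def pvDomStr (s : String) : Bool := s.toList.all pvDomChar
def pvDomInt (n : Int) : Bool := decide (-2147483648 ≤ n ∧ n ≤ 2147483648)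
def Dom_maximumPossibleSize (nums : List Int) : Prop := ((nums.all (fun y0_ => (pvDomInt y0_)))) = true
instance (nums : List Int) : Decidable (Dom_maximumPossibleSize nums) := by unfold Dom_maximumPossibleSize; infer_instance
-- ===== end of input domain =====

-- B replaces A's reverse-order monotonic-stack merge simulation by a single forward
-- O(1)-space pass counting weak prefix maxima (objective: simpler).

-- ===== PORT A =====
-- Python's `while stack and cur > stack[-1]: p = stack.pop(); cur = max(cur, p)`;
-- stack top = list head here.
def pyPopLoop (cur : Int) (stack : List Int) : Int × List Int :=
  match stack with
  | [] => (cur, [])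
  | p :: rest => if cur > p then pyPopLoop (max cur p) rest else (cur, p :: rest)

-- one iteration of A's for-loop body
def pyStep (stack : List Int) (i : Int) : List Int :=
  let r := pyPopLoop i stack
  r.1 :: r.2

def maximumPossibleSize (nums : List Int) : Int :=
  ((nums.reverse.foldl pyStep []).length : Int)

-- ===== PORT B =====
-- state = (count, best); best = None until the first element
def bStep (st : Int × Option Int) (v : Int) : Int × Option Int :=
  match st.2 with
  | none => (st.1 + 1, some v)
  | some b => if v ≥ b then (st.1 + 1, some v) else st

def maximumPossibleSize_alt (nums : List Int) : Int :=
  (nums.foldl bStep (0, none)).1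

-- ===== PRECONDITION & SPEC =====
def Spec_maximumPossibleSize (nums : List Int) (out : Int) : Prop := out = maximumPossibleSize_alt nums
instance (nums : List Int) (out : Int) : Decidable (Spec_maximumPossibleSize nums out) := by unfold Spec_maximumPossibleSize; infer_instance

-- ===== CLAIM (what is proved, stated in full; the proofs are below) =====
def Claim_equal_maximumPossibleSize : Prop := ∀ (nums : List Int), Dom_maximumPossibleSize nums → Spec_maximumPossibleSize nums (maximumPossibleSize nums)

-- ===== LEMMAS AND PROOFS =====

-- the weak left-to-right records of a list, after a running maximum m
def recordsFrom (m : Int) : List Int → List Int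
  | [] => []
  | y :: ys => if y ≥ m then y :: recordsFrom y ys else recordsFrom m ys

def records : List Int → List Int
  | [] => []
  | x :: xs => x :: recordsFrom x xs

lemma popLoop_eq (cur : Int) (s : List Int) :
    pyPopLoop cur s = (cur, s.dropWhile (fun p => decide (p < cur))) := by
  induction s with
  | nil => simp [pyPopLoop, List.dropWhile]
  | cons p rest ih =>
    by_cases h : cur > p
    · simp [pyPopLoop, h, List.dropWhile, max_eq_left h.le, ih]
    · simp [pyPopLoop, h, List.dropWhile]

lemma dropWhile_recordsFrom (x : Int) (ys : List Int) :
    ∀ y : Int, y ≤ x →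
      (recordsFrom y ys).dropWhile (fun p => decide (p < x)) = recordsFrom x ys := by
  induction ys with
  | nil => intro y _; simp [recordsFrom]
  | cons z zs ih =>
    intro y hyx
    by_cases hz : z ≥ y
    · by_cases hzx : z ≥ x
      · simp [recordsFrom, hz, hzx, not_lt.mpr hzx]
      · rw [not_le] at hzx
        simp [recordsFrom, hz, not_le.mpr hzx, hzx, ih z hzx.le]
    · have hzx : ¬ z ≥ x := fun h => hz (le_trans hyx h)
      simp [recordsFrom, hz, hzx, ih y hyx]

lemma dropWhile_records (x : Int) (l : List Int) :
    (records l).dropWhile (fun p => decide (p < x)) = recordsFrom x l := by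
  cases l with
  | nil => simp [records, recordsFrom]
  | cons y ys =>
    by_cases h : y ≥ x
    · simp [records, recordsFrom, h, not_lt.mpr h]
    · rw [not_le] at h
      simp [records, recordsFrom, not_le.mpr h, h,
            dropWhile_recordsFrom x ys y h.le]

lemma stack_eq_records (l : List Int) : l.reverse.foldl pyStep [] = records l := by
  induction l with
  | nil => simp [records]
  | cons x xs ih =>
    rw [List.reverse_cons, List.foldl_append]
    simp only [List.foldl_cons, List.foldl_nil]
    rw [ih]
    simp only [pyStep, popLoop_eq, records]
    exact congrArg (x :: ·) (dropWhile_records x xs)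

lemma bfold_some (l : List Int) : ∀ (c m : Int),
    (l.foldl bStep (c, some m)).1 = c + ((recordsFrom m l).length : Int) := by
  induction l with
  | nil => intro c m; simp [recordsFrom]
  | cons y ys ih =>
    intro c m
    by_cases h : y ≥ m
    · simp [bStep, h, recordsFrom, ih]; omega
    · simp [bStep, h, recordsFrom, ih]

lemma alt_eq_records (nums : List Int) :
    maximumPossibleSize_alt nums = ((records nums).length : Int) := by
  cases nums with
  | nil => simp [maximumPossibleSize_alt, records]
  | cons x xs =>
    simp [maximumPossibleSize_alt, records, List.foldl_cons, bStep, bfold_some]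
    omega

-- ===== VERDICT (by name: the statement is the Claim_ definition above) =====
theorem maximumPossibleSize_spec : Claim_equal_maximumPossibleSize := by
  intro nums _
  unfold Spec_maximumPossibleSize maximumPossibleSize
  rw [stack_eq_records, alt_eq_records]
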